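-- pv_equiv track=rewrite | github.com/eloseden/pygr-align | blastz/blastz_NLMSA.py | find_lavmarkers
-- ===== SOURCE A (Python) =====
-- def find_lavmarkers(buf):
--     """
--     Find the #:lav markers and return a list of their index.
--     """
--     lav_marker_list = []
--     next_block = 1
--
--     while True:
--         lav_marker = buf.find('#:lav',next_block)
--         next_block = lav_marker + 1
--
--         if lav_marker != -1:
--             lav_marker_list.append(lav_marker)
--         elif len(lav_marker_list) >= 1:
--             lav_marker_list.append(len(buf)-1)
--             break
--         else:
--             break
--     return lav_marker_list
-- ===== SOURCE B (Python) =====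
-- def find_lavmarkers(buf):
--     """
--     Find the #:lav markers and return a list of their index.
--
--     B: declarative single pass -- collect every position i >= 1 where the
--     marker starts via one comprehension, then append the sentinel once at
--     the end; no stateful find-jumping while loop.
--     """
--     idxs = [i for i in range(1, len(buf)) if buf.startswith('#:lav', i)]
--     if idxs:
--         idxs.append(len(buf) - 1)
--     return idxs
-- ===== Notes on version B (the rewrite author's own statement) =====
-- stated objective: simpler
-- what changed: The stateful while loop that repeatedly calls buf.find to jump between matches and folds the sentinel logic into its break branches is replaced by one declarative comprehension testing buf.startswith at every position from 1, with the sentinel appended once afterwards.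
import Mathlib
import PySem

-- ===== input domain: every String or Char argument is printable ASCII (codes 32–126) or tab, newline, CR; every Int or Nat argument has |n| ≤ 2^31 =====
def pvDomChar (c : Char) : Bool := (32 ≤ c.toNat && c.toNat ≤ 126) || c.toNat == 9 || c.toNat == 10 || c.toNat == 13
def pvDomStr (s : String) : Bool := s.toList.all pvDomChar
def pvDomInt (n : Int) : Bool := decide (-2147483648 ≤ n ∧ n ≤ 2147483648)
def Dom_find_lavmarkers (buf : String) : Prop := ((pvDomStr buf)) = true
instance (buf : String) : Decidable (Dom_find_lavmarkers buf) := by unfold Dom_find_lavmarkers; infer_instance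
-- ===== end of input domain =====

-- B replaces A's stateful find-jumping while loop by one comprehension over all positions; same value everywhere (proved below).

-- the literal '#:lav'
def pvLavPat : List Char := ['#', ':', 'l', 'a', 'v']

-- needed by the port's termination proof (cited in decreasing_by), hence above the ports
theorem pvFindFrom_facts (s sub : List Char) (nb : Nat)
    (h : PySem.Chars.findFrom s sub (nb : Int) none ≠ -1) :
    nb ≤ s.length ∧ nb ≤ (PySem.Chars.findFrom s sub (nb : Int) none).toNat ∧
      sub <+: s.drop (PySem.Chars.findFrom s sub (nb : Int) none).toNat ∧
      ∀ i, nb ≤ i → i < (PySem.Chars.findFrom s sub (nb : Int) none).toNat → ¬ sub <+: s.drop i := by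
  have hle : nb ≤ s.length := by
    by_contra hgt
    apply h
    simp only [PySem.Chars.findFrom]
    have h1 : ¬ ((nb : Int) < 0) := by omega
    have h2 : ((s.length : Int) < (nb : Int)) := by omega
    simp [h1, h2]
  obtain ⟨h1, h2, h3⟩ := PySem.Chars.findFrom_natCast_spec s sub nb hle h
  exact ⟨hle, by omega, h2, h3⟩

-- ===== PORT A =====
-- A's while loop: find from next_block, append match or (if any found) the sentinel len-1
def pvFindLoop (s : List Char) (nb : Nat) (acc : List Int) : List Int :=
  let m := PySem.Chars.findFrom s pvLavPat (nb : Int) none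
  if _h : m ≠ -1 then
    pvFindLoop s (m.toNat + 1) (acc ++ [m])
  else if acc.length ≥ 1 then acc ++ [(s.length : Int) - 1] else acc
termination_by s.length + 1 - nb
decreasing_by
  have := pvFindFrom_facts s pvLavPat nb _h
  omega

def find_lavmarkers (buf : String) : List Int := pvFindLoop buf.toList 1 []

-- ===== PORT B =====
-- buf.startswith('#:lav', i) with 0 ≤ i is exactly the prefix test on buf[i:]
def find_lavmarkers_alt (buf : String) : List Int :=
  let s := buf.toList
  let idxs := (PySem.List.pyRange 1 (s.length : Int) 1).filter
      (fun i => PySem.Chars.startswith (s.drop i.toNat) pvLavPat)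
  if idxs = [] then [] else idxs ++ [(s.length : Int) - 1]

-- ===== PRECONDITION & SPEC =====
def Spec_find_lavmarkers (buf : String) (out : List Int) : Prop := out = find_lavmarkers_alt buf
instance (buf : String) (out : List Int) : Decidable (Spec_find_lavmarkers buf out) := by unfold Spec_find_lavmarkers; infer_instance

-- ===== CLAIM (what is proved, stated in full; the proofs are below) =====
def Claim_equal_find_lavmarkers : Prop := ∀ (buf : String), Dom_find_lavmarkers buf → Spec_find_lavmarkers buf (find_lavmarkers buf)

-- ===== LEMMAS AND PROOFS =====

-- B's comprehension, parameterised by the start position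
def pvOccs (s : List Char) (nb : Nat) : List Int :=
  (PySem.List.pyRange (nb : Int) (s.length : Int) 1).filter
    (fun i => PySem.Chars.startswith (s.drop i.toNat) pvLavPat)

theorem pvOccs_nil (s : List Char) (nb : Nat)
    (hnone : ∀ i : Nat, nb ≤ i → ¬ pvLavPat <+: s.drop i) : pvOccs s nb = [] := by
  unfold pvOccs
  rw [List.filter_eq_nil_iff]
  intro i hi
  obtain ⟨hlo, _⟩ := PySem.List.mem_pyRange_one.mp hi
  have h0 : (0:Int) ≤ i := le_trans (by positivity) hlo
  intro hsw
  exact hnone i.toNat (by omega) ((PySem.Chars.startswith_iff _ _).mp hsw)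

-- main loop invariant
theorem pvFindLoop_eq (s : List Char) (d : Nat) :
    ∀ (nb : Nat) (acc : List Int), s.length + 1 - nb ≤ d →
      pvFindLoop s nb acc =
        (acc ++ pvOccs s nb) ++
          (if acc ++ pvOccs s nb = [] then [] else [(s.length : Int) - 1]) := by
  induction d with
  | zero =>
    intro nb acc hd
    have hgt : s.length < nb := by omega
    have hm : PySem.Chars.findFrom s pvLavPat (nb : Int) none = -1 := by
      by_contra h
      have := (pvFindFrom_facts s pvLavPat nb h).1
      omega
    have hocc : pvOccs s nb = [] := by
      unfold pvOccs
      rw [List.filter_eq_nil_iff]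
      intro i hi
      obtain ⟨hlo, hhi⟩ := PySem.List.mem_pyRange_one.mp hi
      omega
    rw [pvFindLoop]
    simp only [hm, hocc]
    rcases acc with _ | ⟨a, acc⟩ <;> simp
  | succ d ih =>
    intro nb acc hd
    rw [pvFindLoop]
    by_cases h : PySem.Chars.findFrom s pvLavPat (nb : Int) none ≠ -1
    · obtain ⟨hle, hnbk, hpre, hmin⟩ := pvFindFrom_facts s pvLavPat nb h
      set m := PySem.Chars.findFrom s pvLavPat (nb : Int) none with hm
      set k := m.toNat with hk
      have hmk : m = (k : Int) := by
        have : (0:Int) ≤ m := by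
          rcases PySem.Chars.findFrom_natCast_spec s pvLavPat nb hle h with ⟨h1, -⟩
          omega
        omega
      have hklen : k < s.length := by
        have hne : s.drop k ≠ [] := by
          intro hnil
          rw [hnil] at hpre
          have := List.eq_nil_of_prefix_nil hpre
          simp [pvLavPat] at this
        rw [ne_eq, List.drop_eq_nil_iff] at hne
        omega
      -- split B's comprehension at k
      have hsplit : pvOccs s nb = (k : Int) :: pvOccs s (k + 1) := by
        unfold pvOccs
        rw [PySem.List.pyRange_one_append (nb : Int) (k : Int) (s.length : Int) (by omega) (by omega)]
        rw [PySem.List.pyRange_one_cons (show (k : Int) < (s.length : Int) by omega)]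
        rw [List.filter_append]
        have hfirst : (PySem.List.pyRange (nb : Int) (k : Int) 1).filter
            (fun i => PySem.Chars.startswith (s.drop i.toNat) pvLavPat) = [] := by
          rw [List.filter_eq_nil_iff]
          intro i hi
          obtain ⟨hlo, hhi⟩ := PySem.List.mem_pyRange_one.mp hi
          intro hsw
          exact hmin i.toNat (by omega) (by omega) ((PySem.Chars.startswith_iff _ _).mp hsw)
        have hatk : PySem.Chars.startswith (s.drop (k : Int).toNat) pvLavPat = true := by
          rw [PySem.Chars.startswith_iff]
          simpa using hpre
        have hcast : ((k : Int) + 1) = ((k + 1 : Nat) : Int) := by push_cast; ring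
        rw [hfirst, List.nil_append, List.filter_cons_of_pos (by simpa using hatk), hcast]
      have hrec := ih (k + 1) (acc ++ [m]) (by omega)
      rw [dif_pos h, hrec, hsplit, hmk]
      have h1 : (acc ++ [((k : Nat) : Int)]) ++ pvOccs s (k + 1) = acc ++ (((k : Nat) : Int) :: pvOccs s (k + 1)) := by simp
      have h2 : acc ++ (((k : Nat) : Int) :: pvOccs s (k + 1)) ≠ [] := by simp
      rw [h1]
    · have hm : PySem.Chars.findFrom s pvLavPat (nb : Int) none = -1 := by
        by_contra hc; exact h hc
      have hocc : pvOccs s nb = [] := by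
        apply pvOccs_nil
        intro i hi hpre
        by_cases hlen : nb ≤ s.length
        · have : pvLavPat <:+: s.drop nb := by
            rw [← PySem.Chars.isIn_iff_infix, ← PySem.Chars.exists_prefix_drop_iff_isIn]
            refine ⟨i - nb, ?_⟩
            rw [List.drop_drop]
            have : nb + (i - nb) = i := by omega
            rw [this]; exact hpre
          exact ((PySem.Chars.findFrom_natCast_eq_neg_one_iff s pvLavPat nb hlen).mp hm) this
        · have hne : s.drop i ≠ [] := by
            intro hnil
            rw [hnil] at hpre
            have := List.eq_nil_of_prefix_nil hpre
            simp [pvLavPat] at this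
          rw [ne_eq, List.drop_eq_nil_iff] at hne
          omega
      rw [pvFindLoop]
      simp only [hm, hocc]
      rcases acc with _ | ⟨a, acc⟩ <;> simp

-- ===== VERDICT (by name: the statement is the Claim_ definition above) =====
theorem find_lavmarkers_spec : Claim_equal_find_lavmarkers := by
  intro buf _
  unfold Spec_find_lavmarkers find_lavmarkers find_lavmarkers_alt
  rw [pvFindLoop_eq buf.toList (buf.toList.length + 1) 1 [] (by omega)]
  have : pvOccs buf.toList 1 =
      (PySem.List.pyRange 1 ((buf.toList.length : Nat) : Int) 1).filter
        (fun i => PySem.Chars.startswith (buf.toList.drop i.toNat) pvLavPat) := by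
    unfold pvOccs; norm_num
  simp only [List.nil_append, ← this]
  by_cases hocc : pvOccs buf.toList 1 = [] <;> simp [hocc]
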